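-- pv_equiv track=rewrite | github.com/12fn/MDMhackathon-repos | 29-chorus-pa-audience-sim/src/agent.py | pick_personas
-- ===== SOURCE A (Python) =====
-- def pick_personas(personas: list[dict], n: int = 5) -> list[dict]:
--     """Pick a balanced 5-persona panel: 2 domestic + 2 host/coalition + 1 adversary.
--
--     The brief calls out 5 specific archetypes; this selector hits all three
--     audience tiers so the panel is never one-dimensional.
--     """
--     by_tier: dict[str, list[dict]] = {}
--     for p in personas:
--         by_tier.setdefault(p["tier"], []).append(p)
--     domestic = by_tier.get("Domestic media & oversight", [])[:2]
--     coalition = by_tier.get("Host-nation & coalition", [])[:2]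
--     adversary = by_tier.get("Adversary / contested IE", [])[:1]
--     panel = domestic + coalition + adversary
--     return panel[:n] if panel else personas[:n]
-- ===== SOURCE B (Python) =====
-- def pick_personas(personas: list[dict], n: int = 5) -> list[dict]:
--     """Pick a balanced 5-persona panel: 2 domestic + 2 host/coalition + 1 adversary."""
--     def take(tier, k):
--         return [p for p in personas if p["tier"] == tier][:k]
--     panel = (take("Domestic media & oversight", 2)
--              + take("Host-nation & coalition", 2)
--              + take("Adversary / contested IE", 1))
--     return panel[:n] if panel else personas[:n]
-- ===== Notes on version B (the rewrite author's own statement) =====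
-- stated objective: simpler
-- what changed: Replaces the single-pass dict-of-buckets grouping with three direct per-tier filter-and-slice passes over the personas list, removing the dict entirely.
import Mathlib
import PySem

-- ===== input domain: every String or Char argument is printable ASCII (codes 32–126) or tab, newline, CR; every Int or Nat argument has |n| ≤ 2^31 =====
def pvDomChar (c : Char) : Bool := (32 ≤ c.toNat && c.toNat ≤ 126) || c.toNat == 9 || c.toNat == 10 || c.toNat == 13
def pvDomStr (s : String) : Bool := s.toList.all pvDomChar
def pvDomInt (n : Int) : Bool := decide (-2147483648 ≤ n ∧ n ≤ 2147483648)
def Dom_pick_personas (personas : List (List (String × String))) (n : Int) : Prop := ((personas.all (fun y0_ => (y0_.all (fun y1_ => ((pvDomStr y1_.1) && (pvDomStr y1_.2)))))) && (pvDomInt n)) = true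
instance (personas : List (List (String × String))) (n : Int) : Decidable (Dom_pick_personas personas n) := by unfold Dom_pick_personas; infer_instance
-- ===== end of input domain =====

-- ===== PORT A =====
-- B replaces the one-pass dict-of-buckets grouping with three direct per-tier filter passes (simpler; same cost).
-- p["tier"]: first-match lookup on the association list (total form; Pre_ guarantees the key exists)
def pvTier (p : List (String × String)) : String :=
  (PySem.Dict.mk p).getD "tier" ""

def pick_personas (personas : List (List (String × String))) (n : Int) : List (List (String × String)) :=
  -- by_tier.setdefault(p["tier"], []).append(p)  ==  d[t] = d.get(t, []) + [p]
  let by_tier : PySem.Dict String (List (List (String × String))) :=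
    personas.foldl (fun d p => d.modify (pvTier p) [] (fun l => l ++ [p])) PySem.Dict.empty
  let domestic := PySem.List.slice (by_tier.getD "Domestic media & oversight" []) none (some 2)
  let coalition := PySem.List.slice (by_tier.getD "Host-nation & coalition" []) none (some 2)
  let adversary := PySem.List.slice (by_tier.getD "Adversary / contested IE" []) none (some 1)
  let panel := domestic ++ coalition ++ adversary
  if panel ≠ [] then PySem.List.slice panel none (some n) else PySem.List.slice personas none (some n)

-- ===== PORT B =====
def pvTakeTier (personas : List (List (String × String))) (t : String) (k : Int) :
    List (List (String × String)) :=
  PySem.List.slice (personas.filter (fun p => pvTier p == t)) none (some k)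

def pick_personas_alt (personas : List (List (String × String))) (n : Int) : List (List (String × String)) :=
  let panel := pvTakeTier personas "Domestic media & oversight" 2
               ++ pvTakeTier personas "Host-nation & coalition" 2
               ++ pvTakeTier personas "Adversary / contested IE" 1
  if panel ≠ [] then PySem.List.slice panel none (some n) else PySem.List.slice personas none (some n)

-- ===== PRECONDITION & SPEC =====
-- Pre_ excludes personas missing the "tier" key, where Python A raises KeyError.
def Pre_pick_personas (personas : List (List (String × String))) (n : Int) : Prop :=
  ∀ p ∈ personas, p.any (fun kv => kv.1 == "tier")
instance (personas : List (List (String × String))) (n : Int) : Decidable (Pre_pick_personas personas n) := by unfold Pre_pick_personas; infer_instance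
def pvWitness_pick_personas : (List (List (String × String))) × Int :=
  ([[("tier", "Domestic media & oversight"), ("name", "a")],
    [("tier", "Adversary / contested IE"), ("name", "b")]], 5)

def Spec_pick_personas (personas : List (List (String × String))) (n : Int) (out : List (List (String × String))) : Prop := out = pick_personas_alt personas n
instance (personas : List (List (String × String))) (n : Int) (out : List (List (String × String))) : Decidable (Spec_pick_personas personas n out) := by unfold Spec_pick_personas; infer_instance

-- ===== CLAIM (what is proved, stated in full; the proofs are below) =====
def Claim_equal_pick_personas : Prop := ∀ (personas : List (List (String × String))) (n : Int), Dom_pick_personas personas n → Pre_pick_personas personas n → Spec_pick_personas personas n (pick_personas personas n)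

-- ===== LEMMAS AND PROOFS =====
-- The grouping loop of A, read back through one key, is exactly B's filter.
theorem bucket_eq_filter (xs : List (List (String × String)))
    (d : PySem.Dict String (List (List (String × String)))) (t : String) :
    (xs.foldl (fun d p => d.modify (pvTier p) [] (fun l => l ++ [p])) d).getD t []
      = d.getD t [] ++ xs.filter (fun p => pvTier p == t) := by
  induction xs generalizing d with
  | nil => simp
  | cons p xs ih =>
    simp only [List.foldl_cons, List.filter_cons, ih]
    by_cases h : pvTier p = t
    · subst h; simp [PySem.Dict.getD_modify_self]
    · rw [PySem.Dict.getD_modify_of_ne]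
      · simp [h]
      · exact fun hx => h hx.symm

-- ===== VERDICT (by name: the statement is the Claim_ definition above) =====
theorem pick_personas_spec : Claim_equal_pick_personas := by
  intro personas n _ _
  show pick_personas personas n = pick_personas_alt personas n
  simp only [pick_personas, pick_personas_alt, pvTakeTier, bucket_eq_filter]
  simp
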